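-- pv_equiv track=rewrite | github.com/katarinarosiak/python_fundamentals | excercises/fundamentals/1000_lights.py | switcher
-- ===== SOURCE A (Python) =====
-- def switcher(switch_num):
--     switches = [False] * switch_num
--     start = 0
--     step = 1
--     for i in range(switch_num):
--         for idx in range(start, switch_num, step):
--             if switches[idx]:
--                 switches[idx] = False
--             else:
--                 switches[idx] = True
--         step += 1
--         start += 1
--     return [idx + 1 for idx, switch in enumerate(switches) if switch]
-- ===== SOURCE B (Python) =====
-- def switcher(switch_num):
--     # A light ends ON iff its number has an odd divisor count, i.e. is a
--     # perfect square: emit k*k for k = 1, 2, ... while k*k <= switch_num.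
--     result = []
--     k = 1
--     while k * k <= switch_num:
--         result.append(k * k)
--         k += 1
--     return result
-- ===== Notes on version B (the rewrite author's own statement) =====
-- stated objective: faster
-- what changed: Replaces the O(n log n) simulation of all toggle passes over a boolean array by directly emitting the perfect squares k*k <= switch_num (light m stays on iff m has an odd number of divisors, i.e. m is a square), in O(sqrt(n)) time and output-size space.
import Mathlib
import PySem

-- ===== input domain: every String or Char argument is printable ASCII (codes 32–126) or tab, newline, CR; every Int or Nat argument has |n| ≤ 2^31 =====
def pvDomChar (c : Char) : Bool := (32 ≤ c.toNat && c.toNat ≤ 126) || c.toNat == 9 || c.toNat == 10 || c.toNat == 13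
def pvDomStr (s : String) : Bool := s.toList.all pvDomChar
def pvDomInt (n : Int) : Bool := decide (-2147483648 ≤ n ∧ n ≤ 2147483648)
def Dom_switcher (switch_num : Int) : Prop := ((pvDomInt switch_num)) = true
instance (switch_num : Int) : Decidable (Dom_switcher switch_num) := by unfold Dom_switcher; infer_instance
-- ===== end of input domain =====

-- B replaces A's full simulation of every toggling pass over a boolean array by
-- directly emitting the perfect squares k*k ≤ switch_num (objective: faster).

-- ===== PORT A =====
-- Transliteration of A: switches = [False]*switch_num; nested loops over
-- range(switch_num) / range(start, switch_num, step) toggling switches[idx];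
-- then [idx+1 for idx, switch in enumerate(switches) if switch].
-- Every idx produced by range(start, switch_num, step) with start ≥ 0 satisfies
-- 0 ≤ idx < len(switches), so the read switches[idx] is `getD idx.toNat false`
-- and the write is `List.set idx.toNat` — exact on those indices.
def switcher (switch_num : Int) : List Int :=
  let switches : List Bool := List.replicate switch_num.toNat false
  let st :=
    (PySem.List.pyRange 0 switch_num 1).foldl
      (fun st _i =>
        ((PySem.List.pyRange st.2.1 switch_num st.2.2).foldl
            (fun sw idx => sw.set idx.toNat (!(sw.getD idx.toNat false))) st.1,
         st.2.1 + 1, st.2.2 + 1))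
      (switches, (0 : Int), (1 : Int))
  (PySem.List.enumerate st.1 0).filterMap (fun p => if p.2 then some (p.1 + 1) else none)

-- ===== PORT B =====
-- Transliteration of B's while-loop `k = 1; while k*k <= switch_num: append k*k; k += 1`,
-- made total with fuel switch_num.toNat + 1 (sufficient: 1 ≤ k ≤ k*k ≤ switch_num
-- throughout, so the loop body runs at most switch_num.toNat times).
def pvSquares (n : Int) : Nat → Int → List Int
  | 0, _ => []
  | fuel + 1, k => if k * k ≤ n then k * k :: pvSquares n fuel (k + 1) else []

def switcher_alt (switch_num : Int) : List Int :=
  pvSquares switch_num (switch_num.toNat + 1) 1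

-- ===== PRECONDITION & SPEC =====
def Spec_switcher (switch_num : Int) (out : List Int) : Prop := out = switcher_alt switch_num
instance (switch_num : Int) (out : List Int) : Decidable (Spec_switcher switch_num out) := by unfold Spec_switcher; infer_instance

-- ===== CLAIM (what is proved, stated in full; the proofs are below) =====
def Claim_equal_switcher : Prop := ∀ (switch_num : Int), Dom_switcher switch_num → Spec_switcher switch_num (switcher switch_num)

-- ===== LEMMAS AND PROOFS =====

-- state of light j after the first m passes: parity of #{1 ≤ d ≤ m : d ∣ j+1}
def pvG (m j : Nat) : Bool :=
  decide (Odd ((List.range m).countP (fun i : Nat => decide (((i : Int) + 1) ∣ ((j : Int) + 1)))))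

-- ---- the toggle fold, pointwise ----

theorem pvTog_length (L : List Int) (sw : List Bool) :
    (L.foldl (fun sw idx => sw.set idx.toNat (!(sw.getD idx.toNat false))) sw).length
      = sw.length := by
  induction L generalizing sw with
  | nil => rfl
  | cons a L ih => simpa [List.foldl_cons] using (ih _).trans (by simp)

theorem pvTog_getD (L : List Int) (sw : List Bool) (j : Nat)
    (hL : ∀ x ∈ L, 0 ≤ x) (hj : j < sw.length) :
    (L.foldl (fun sw idx => sw.set idx.toNat (!(sw.getD idx.toNat false))) sw).getD j false
      = xor (sw.getD j false) (decide (Odd (L.count (j : Int)))) := by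
  induction L generalizing sw with
  | nil => simp
  | cons a L ih =>
    have ha : 0 ≤ a := hL a (by simp)
    have hlen : (sw.set a.toNat (!(sw.getD a.toNat false))).length = sw.length := by simp
    rw [List.foldl_cons, ih _ (fun x hx => hL x (by simp [hx])) (by omega)]
    by_cases h : a = (j : Int)
    · have htn : a.toNat = j := by omega
      rw [htn, h, List.count_cons_self]
      have hset : (sw.set j (!(sw.getD j false))).getD j false = !(sw.getD j false) := by
        rw [List.getD_eq_getElem?_getD, List.getElem?_set_self hj]; rfl
      rw [hset]
      cases hb : sw.getD j false <;> cases hc : decide (Odd (L.count ((j : Int)))) <;>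
        simp_all [Nat.odd_add_one]
    · have htn : a.toNat ≠ j := by omega
      have hset : (sw.set a.toNat (!(sw.getD a.toNat false))).getD j false
          = sw.getD j false := by
        rw [List.getD_eq_getElem?_getD, List.getElem?_set_ne htn, ← List.getD_eq_getElem?_getD]
      rw [hset, List.count_cons_of_ne h]

-- ---- counting an index in range(i, n, i+1) ----

theorem pvRange_nodup (a b s : Int) (hs : 0 < s) :
    (PySem.List.pyRange a b s).Nodup := by
  rw [PySem.List.pyRange_of_pos a b hs]
  refine List.Nodup.map ?_ List.nodup_range
  intro x y hxy
  have h1 : s * (x : Int) = s * (y : Int) := by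
    have := add_left_cancel hxy
    linarith
  have h2 := mul_left_cancel₀ (ne_of_gt hs) h1
  exact_mod_cast h2

theorem pvRange_count (i n : Int) (j : Nat) (hi : 0 ≤ i) (hj : (j : Int) < n) :
    (PySem.List.pyRange i n (i + 1)).count (j : Int)
      = if (i + 1) ∣ ((j : Int) + 1) then 1 else 0 := by
  have hs : (0 : Int) < i + 1 := by omega
  have hmem : (j : Int) ∈ PySem.List.pyRange i n (i + 1) ↔ (i + 1) ∣ ((j : Int) + 1) := by
    rw [PySem.List.mem_pyRange_iff_of_pos hs]
    constructor
    · rintro ⟨h1, h2, c, hc⟩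
      refine ⟨c + 1, ?_⟩
      have hring : (i + 1) * (c + 1) = (i + 1) * c + (i + 1) := by ring
      omega
    · rintro ⟨c, hc⟩
      have hle : i + 1 ≤ (j : Int) + 1 := Int.le_of_dvd (by omega) ⟨c, hc⟩
      refine ⟨by omega, hj, ⟨c - 1, ?_⟩⟩
      have hring : (i + 1) * (c - 1) = (i + 1) * c - (i + 1) := by ring
      omega
  by_cases h : (i + 1) ∣ ((j : Int) + 1)
  · rw [if_pos h]
    exact List.count_eq_one_of_mem (pvRange_nodup _ _ _ hs) (hmem.mpr h)
  · rw [if_neg h]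
    exact List.count_eq_zero_of_not_mem (fun hm => h (hmem.mp hm))

-- ---- the outer fold invariant ----

theorem pvG_succ (m j : Nat) :
    pvG (m + 1) j = xor (pvG m j) (decide (((m : Int) + 1) ∣ ((j : Int) + 1))) := by
  unfold pvG
  rw [List.range_succ, List.countP_append]
  by_cases h : ((m : Int) + 1) ∣ ((j : Int) + 1)
  · simp only [List.countP_cons, List.countP_nil, h, decide_true, if_pos, Nat.zero_add]
    cases hb : decide (Odd ((List.range m).countP
        (fun i : Nat => decide (((i : Int) + 1) ∣ ((j : Int) + 1))))) <;>
      simp_all [Nat.odd_add_one]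
  · simp [h]

theorem pvOuter (n : Int) (hn : 0 ≤ n) (m : Nat) (hm : (m : Int) ≤ n) :
    (PySem.List.pyRange 0 (m : Int) 1).foldl
      (fun st _i =>
        ((PySem.List.pyRange st.2.1 n st.2.2).foldl
            (fun sw idx => sw.set idx.toNat (!(sw.getD idx.toNat false))) st.1,
         st.2.1 + 1, st.2.2 + 1))
      (List.replicate n.toNat false, (0 : Int), (1 : Int))
      = ((List.range n.toNat).map (pvG m), (m : Int), (m : Int) + 1) := by
  induction m with
  | zero =>
    rw [show ((0 : Nat) : Int) = 0 by norm_num, PySem.List.pyRange_one_eq_nil (by norm_num)]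
    simp only [List.foldl_nil]
    refine congrArg (fun l => (l, (0 : Int), (1 : Int))) ?_
    apply List.ext_getElem (by simp)
    intro k h1 h2
    simp [pvG]
  | succ m ih =>
    have hm' : (m : Int) ≤ n := by push_cast at hm ⊢; omega
    rw [show ((m + 1 : Nat) : Int) = (m : Int) + 1 by push_cast; ring,
      PySem.List.pyRange_one_succ_right (by positivity), List.foldl_append, ih hm']
    simp only [List.foldl_cons, List.foldl_nil]
    refine congrArg (fun l => (l, (m : Int) + 1, (m : Int) + 1 + 1)) ?_
    have hLpos : ∀ x ∈ PySem.List.pyRange (m : Int) n ((m : Int) + 1), 0 ≤ x := by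
      intro x hx
      obtain ⟨h1, h2, -⟩ := (PySem.List.mem_pyRange_iff_of_pos (by positivity) x).mp hx
      omega
    apply List.ext_getElem
    · rw [pvTog_length]; simp
    intro k h1 h2
    have hk : k < n.toNat := by rw [pvTog_length] at h1; simpa using h1
    have hgetD := pvTog_getD (PySem.List.pyRange (m : Int) n ((m : Int) + 1))
      ((List.range n.toNat).map (pvG m)) k hLpos (by simpa using hk)
    rw [pvRange_count (m : Int) n k (by positivity) (by omega)] at hgetD
    have hL : ((List.range n.toNat).map (pvG m)).getD k false = pvG m k := by
      rw [List.getD_eq_getElem?_getD]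
      simp [hk]
    rw [hL] at hgetD
    have hR :
        ((PySem.List.pyRange (m : Int) n ((m : Int) + 1)).foldl
          (fun sw idx => sw.set idx.toNat (!(sw.getD idx.toNat false)))
          ((List.range n.toNat).map (pvG m)))[k]
        = ((PySem.List.pyRange (m : Int) n ((m : Int) + 1)).foldl
          (fun sw idx => sw.set idx.toNat (!(sw.getD idx.toNat false)))
          ((List.range n.toNat).map (pvG m))).getD k false := by
      rw [List.getD_eq_getElem?_getD, List.getElem?_eq_getElem h1]
      rfl
    rw [hR, hgetD]
    have hG : (List.map (pvG (m + 1)) (List.range n.toNat))[k]'h2 = pvG (m + 1) k := by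
      simp
    rw [hG, pvG_succ]
    by_cases h : ((m : Int) + 1) ∣ ((k : Int) + 1) <;> simp [h, Nat.odd_iff]

-- ---- counting divisors: countP over range = card of divisors ----

theorem pvCountP_range_card (N : Nat) (p : Nat → Bool) :
    (List.range N).countP p = ((Finset.range N).filter (fun i => p i = true)).card := by
  induction N with
  | zero => simp
  | succ N ih =>
    rw [List.range_succ, List.countP_append, Finset.range_add_one, Finset.filter_insert]
    by_cases h : p N = true <;>
      simp [h, ih, Finset.card_insert_of_notMem]

theorem pvCard_filter_divisors (N m : Nat) (hm : 0 < m) (hmN : m ≤ N) :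
    ((Finset.range N).filter (fun i => decide ((i + 1) ∣ m) = true)).card
      = m.divisors.card := by
  apply Finset.card_nbij (fun i => i + 1)
  · intro i hi
    simp only [Finset.coe_filter, Set.mem_setOf_eq, Finset.mem_range, decide_eq_true_eq] at hi
    show i + 1 ∈ (m.divisors : Set Nat)
    simp only [Finset.mem_coe, Nat.mem_divisors]
    exact ⟨hi.2, by omega⟩
  · intro a _ b _ h
    have h' : a + 1 = b + 1 := h
    omega
  · intro d hd
    simp only [Finset.mem_coe, Nat.mem_divisors] at hd
    have h1 : 1 ≤ d := by
      rcases Nat.eq_zero_or_pos d with rfl | h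
      · exact absurd (Nat.eq_zero_of_zero_dvd hd.1) (by omega)
      · exact h
    have h2 : d ≤ m := Nat.le_of_dvd hm hd.1
    have hmem : d - 1 ∈ (Finset.range N).filter (fun i => decide ((i + 1) ∣ m) = true) := by
      simp only [Finset.mem_filter, Finset.mem_range, decide_eq_true_eq]
      exact ⟨by omega, by simpa [Nat.sub_add_cancel h1] using hd.1⟩
    exact ⟨d - 1, by simpa using hmem, show d - 1 + 1 = d by omega⟩

-- ---- odd number of divisors iff perfect square ----

theorem pvOdd_divisors_iff (m : Nat) (hm : 0 < m) :
    Odd m.divisors.card ↔ IsSquare m := by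
  classical
  set lo := m.divisors.filter (fun d => d * d < m) with hlo_def
  set mid := m.divisors.filter (fun d => d * d = m) with hmid_def
  set hi := m.divisors.filter (fun d => m < d * d) with hhi_def
  have hsplit : m.divisors.card = lo.card + mid.card + hi.card := by
    have h1 := Finset.card_filter_add_card_filter_not (s := m.divisors) (fun d => d * d < m)
    have h2 := Finset.card_filter_add_card_filter_not
      (s := m.divisors.filter (fun d => ¬ d * d < m)) (fun d => d * d = m)
    rw [Finset.filter_filter, Finset.filter_filter] at h2
    have e1 : m.divisors.filter (fun a => ¬ a * a < m ∧ a * a = m) = mid :=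
      Finset.filter_congr (fun d _ => by omega)
    have e2 : m.divisors.filter (fun a => ¬ a * a < m ∧ ¬ a * a = m) = hi :=
      Finset.filter_congr (fun d _ => by omega)
    rw [e1, e2] at h2
    rw [hlo_def]
    omega
  have hlohi : lo.card = hi.card := by
    apply Finset.card_nbij (fun d => m / d)
    · intro d hd
      simp only [hlo_def, Finset.coe_filter, Set.mem_setOf_eq, Nat.mem_divisors] at hd
      obtain ⟨⟨hdvd, hne⟩, hlt⟩ := hd
      obtain ⟨c, hc⟩ := hdvd
      have hd0 : 0 < d := by
        rcases Nat.eq_zero_or_pos d with h0 | h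
        · rw [h0, zero_mul] at hc; omega
        · exact h
      have hc0 : 0 < c := by
        rcases Nat.eq_zero_or_pos c with h0 | h
        · rw [h0, mul_zero] at hc; omega
        · exact h
      have hdc : d < c := by nlinarith
      have hdiv : m / d = c := by rw [hc]; exact Nat.mul_div_cancel_left _ hd0
      show m / d ∈ (m.divisors.filter (fun d => m < d * d) : Set Nat)
      simp only [Finset.coe_filter, Set.mem_setOf_eq, Nat.mem_divisors]
      rw [hdiv]
      exact ⟨⟨⟨d, by rw [hc]; ring⟩, hne⟩, by nlinarith⟩
    · intro a ha b hb hab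
      simp only [hlo_def, Finset.coe_filter, Set.mem_setOf_eq, Nat.mem_divisors] at ha hb
      have hab' : m / a = m / b := hab
      rw [← Nat.div_div_self ha.1.1 (by omega), hab', Nat.div_div_self hb.1.1 (by omega)]
    · intro e he
      simp only [hhi_def, Finset.coe_filter, Set.mem_setOf_eq, Nat.mem_divisors] at he
      obtain ⟨⟨hdvd, hne⟩, hgt⟩ := he
      obtain ⟨c, hc⟩ := hdvd
      have he0 : 0 < e := by
        rcases Nat.eq_zero_or_pos e with h0 | h
        · rw [h0, zero_mul] at hc; omega
        · exact h
      have hc0 : 0 < c := by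
        rcases Nat.eq_zero_or_pos c with h0 | h
        · rw [h0, mul_zero] at hc; omega
        · exact h
      have hce : c < e := by nlinarith
      refine ⟨c, ?_, ?_⟩
      · show c ∈ (m.divisors.filter (fun d => d * d < m) : Set Nat)
        simp only [Finset.coe_filter, Set.mem_setOf_eq, Nat.mem_divisors]
        exact ⟨⟨⟨e, by rw [hc]; ring⟩, hne⟩, by nlinarith⟩
      · show m / c = e
        rw [hc, mul_comm]
        exact Nat.mul_div_cancel_left _ hc0
  have hmid_card : mid.card = if IsSquare m then 1 else 0 := by
    by_cases h : IsSquare m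
    · obtain ⟨r, hr⟩ := h
      have hmid_eq : mid = {r} := by
        apply Finset.ext
        intro d
        simp only [hmid_def, Finset.mem_filter, Nat.mem_divisors, Finset.mem_singleton]
        constructor
        · rintro ⟨-, hdd⟩
          exact Nat.mul_self_inj.mp (by omega)
        · intro hd
          rw [hd]
          exact ⟨⟨⟨r, hr⟩, by omega⟩, hr.symm⟩
      rw [hmid_eq, if_pos ⟨r, hr⟩]
      simp
    · have hmid_eq : mid = ∅ := by
        apply Finset.eq_empty_of_forall_notMem
        intro d hd
        simp only [hmid_def, Finset.mem_filter] at hd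
        exact h ⟨d, hd.2.symm⟩
      rw [hmid_eq, if_neg h]
      simp
  rw [hsplit, hlohi, hmid_card]
  by_cases h : IsSquare m
  · simp only [if_pos h, Nat.odd_iff]
    constructor
    · intro _; exact h
    · intro _; omega
  · simp only [if_neg h, Nat.odd_iff]
    constructor
    · intro hc; omega
    · intro hc; exact absurd hc h

theorem pvG_isSquare (N j : Nat) (hj : j < N) :
    pvG N j = decide (IsSquare (j + 1)) := by
  unfold pvG
  have h1 : (List.range N).countP (fun i : Nat => decide (((i : Int) + 1) ∣ ((j : Int) + 1)))
      = (List.range N).countP (fun i : Nat => decide ((i + 1) ∣ (j + 1))) := by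
    apply List.countP_congr
    intro x _
    simp only [decide_eq_true_eq]
    constructor
    · intro h
      have h' : ((x + 1 : Nat) : Int) ∣ ((j + 1 : Nat) : Int) := by push_cast; exact h
      exact Int.natCast_dvd_natCast.mp h'
    · intro h
      have h' := Int.natCast_dvd_natCast.mpr h
      push_cast at h'
      exact h'
  rw [h1, pvCountP_range_card, pvCard_filter_divisors N (j + 1) (by omega) (by omega)]
  exact decide_eq_decide.mpr (pvOdd_divisors_iff (j + 1) (by omega))

-- ---- the output comprehension ----

theorem pvEnum_filterMap (f : Nat → Bool) (N : Nat) :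
    (PySem.List.enumerate ((List.range N).map f) 0).filterMap
        (fun p => if p.2 then some (p.1 + 1) else none)
      = ((List.range N).filter f).map (fun j : Nat => ((j : Int) + 1)) := by
  induction N with
  | zero => simp [PySem.List.enumerate_nil]
  | succ N ih =>
    rw [List.range_succ, List.map_append, PySem.List.enumerate_append, List.filterMap_append,
      List.filter_append, List.map_append, ih]
    congr 1
    simp only [List.map_cons, List.map_nil, PySem.List.enumerate_cons, PySem.List.enumerate_nil,
      List.length_map, List.length_range]
    by_cases h : f N <;> simp [h]

-- ---- squares: the filtered range vs range' of the squares ----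

theorem pvSqrt_succ_square (N t : Nat) (ht : 0 < t) (hN : N + 1 = t * t) :
    Nat.sqrt N = t - 1 ∧ Nat.sqrt (N + 1) = t := by
  obtain ⟨u, rfl⟩ : ∃ u, t = u + 1 := ⟨t - 1, by omega⟩
  have hexp : (u + 1) * (u + 1) = u * u + 2 * u + 1 := by ring
  have hNu : N = u * u + 2 * u := by omega
  constructor
  · have h1 : u ≤ Nat.sqrt N := Nat.le_sqrt.mpr (by omega)
    have h2 : Nat.sqrt N < u + 1 := Nat.sqrt_lt.mpr (by omega)
    omega
  · rw [hN, Nat.sqrt_eq]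

theorem pvSqrt_succ_nonsquare (N : Nat) (h : ¬ IsSquare (N + 1)) :
    Nat.sqrt (N + 1) = Nat.sqrt N := by
  have h1 : Nat.sqrt N ≤ Nat.sqrt (N + 1) := Nat.sqrt_le_sqrt (by omega)
  have h2 : Nat.sqrt (N + 1) * Nat.sqrt (N + 1) ≤ N + 1 := Nat.sqrt_le _
  have h3 : Nat.sqrt (N + 1) * Nat.sqrt (N + 1) ≠ N + 1 := by
    intro he
    exact h ⟨Nat.sqrt (N + 1), he.symm⟩
  have h5 : Nat.sqrt (N + 1) ≤ Nat.sqrt N := Nat.le_sqrt.mpr (by omega)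
  omega

theorem pvFilter_square_range (N : Nat) :
    ((List.range N).filter (fun j => decide (IsSquare (j + 1)))).map (fun j => j + 1)
      = (List.range' 1 (Nat.sqrt N)).map (fun t => t * t) := by
  induction N with
  | zero => simp
  | succ N ih =>
    rw [List.range_succ, List.filter_append, List.map_append, ih]
    by_cases h : IsSquare (N + 1)
    · obtain ⟨t, ht⟩ := h
      have ht0 : 0 < t := by
        rcases Nat.eq_zero_or_pos t with rfl | h'
        · simp at ht
        · exact h'
      obtain ⟨hs1, hs2⟩ := pvSqrt_succ_square N t ht0 ht
      rw [hs2, show t = (t - 1) + 1 by omega, List.range'_concat, List.map_append, hs1]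
      congr 1
      have hsq : IsSquare (N + 1) := ⟨t, ht⟩
      simp only [List.filter_cons, List.filter_nil, hsq, if_pos, List.map_cons,
        List.map_nil, decide_true]
      have harith : (1 + 1 * (t - 1)) * (1 + 1 * (t - 1)) = t * t := by
        have : 1 + 1 * (t - 1) = t := by omega
        rw [this]
      rw [harith, ← ht]
    · rw [pvSqrt_succ_nonsquare N h]
      simp [h]

-- ---- port B unrolled ----

theorem pvSquares_eq (n : Int) (hn : 0 ≤ n) :
    ∀ (fuel : Nat) (k : Nat), 1 ≤ k → n.toNat + 1 ≤ k + fuel →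
      pvSquares n fuel (k : Int)
        = (List.range' k (Nat.sqrt n.toNat + 1 - k)).map (fun t => ((t * t : Nat) : Int)) := by
  intro fuel
  induction fuel with
  | zero =>
    intro k hk hfk
    have hle := Nat.sqrt_le_self n.toNat
    rw [show Nat.sqrt n.toNat + 1 - k = 0 by omega]
    simp [pvSquares]
  | succ fuel ih =>
    intro k hk hfk
    rw [pvSquares]
    by_cases h : (k : Int) * (k : Int) ≤ n
    · have h2 : ((k * k : Nat) : Int) ≤ n := by push_cast; exact h
      have hkk : k * k ≤ n.toNat := by omega
      have hks : k ≤ Nat.sqrt n.toNat := Nat.le_sqrt.mpr hkk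
      rw [if_pos h, show ((k : Int) + 1) = ((k + 1 : Nat) : Int) by push_cast; ring,
        ih (k + 1) (by omega) (by omega),
        show Nat.sqrt n.toNat + 1 - (k + 1) = Nat.sqrt n.toNat - k by omega,
        show Nat.sqrt n.toNat + 1 - k = (Nat.sqrt n.toNat - k) + 1 by omega,
        List.range'_succ, List.map_cons]
      have hhead : (k : Int) * (k : Int) = ((k * k : Nat) : Int) := by push_cast; ring
      rw [hhead]
    · have hsq : Nat.sqrt n.toNat < k := by
        by_contra hc
        push Not at hc
        have h3 : k * k ≤ n.toNat := Nat.le_sqrt.mp hc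
        have h4 : ((k * k : Nat) : Int) ≤ n := by omega
        push_cast at h4
        exact h h4
      rw [if_neg h, show Nat.sqrt n.toNat + 1 - k = 0 by omega]
      simp

-- ---- assembly ----

theorem pvSwitcher_neg (n : Int) (hn : n < 0) : switcher n = [] := by
  simp only [switcher]
  rw [PySem.List.pyRange_one_eq_nil (by omega), show n.toNat = 0 by omega]
  simp [PySem.List.enumerate_nil]

theorem pvSwitcherAlt_neg (n : Int) (hn : n < 0) : switcher_alt n = [] := by
  simp only [switcher_alt]
  rw [show n.toNat = 0 by omega, pvSquares]
  rw [if_neg (by omega)]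

theorem pvMain (n : Int) : switcher n = switcher_alt n := by
  by_cases hn : n < 0
  · rw [pvSwitcher_neg n hn, pvSwitcherAlt_neg n hn]
  · push Not at hn
    have hN : ((n.toNat : Nat) : Int) = n := Int.toNat_of_nonneg hn
    simp only [switcher]
    rw [show PySem.List.pyRange 0 n 1 = PySem.List.pyRange 0 ((n.toNat : Nat) : Int) 1 by
        rw [hN],
      pvOuter n hn n.toNat (by omega)]
    rw [pvEnum_filterMap (pvG n.toNat) n.toNat,
      List.filter_congr (fun x hx => pvG_isSquare n.toNat x (by simpa using hx))]
    simp only [switcher_alt]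
    rw [show (1 : Int) = ((1 : Nat) : Int) by norm_num,
      pvSquares_eq n hn (n.toNat + 1) 1 (le_refl _) (by omega),
      show Nat.sqrt n.toNat + 1 - 1 = Nat.sqrt n.toNat by omega]
    have hmapped := congrArg (List.map (fun j : Nat => (j : Int))) (pvFilter_square_range n.toNat)
    rw [List.map_map, List.map_map] at hmapped
    exact hmapped

-- ===== VERDICT (by name: the statement is the Claim_ definition above) =====
theorem switcher_spec : Claim_equal_switcher := by
  intro n _
  unfold Spec_switcher
  exact pvMain n
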